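-- pv_equiv track=rewrite | github.com/MarkovMaksim2/csa-lab3 | runnable/head.py | replace_escape_sequences
-- ===== SOURCE A (Python) =====
-- def replace_escape_sequences(input_data: list[str]) -> list[str]:
--     i = len(input_data) - 1
--     while i > 0:
--         if input_data[i] == "n" and input_data[i - 1] == "\\":
--             input_data.pop(i - 1)
--             input_data[i - 1] = "\n"
--             i -= 1
--         i -= 1
--
--     return input_data
-- ===== SOURCE B (Python) =====
-- def replace_escape_sequences(input_data: list[str]) -> list[str]:
--     if "n" not in input_data:
--         return input_data
--     out = []
--     i = 0
--     while True:
--         try: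
--             j = input_data.index("n", i + 1)
--         except ValueError:
--             out.extend(input_data[i:])
--             break
--         if input_data[j - 1] == "\\":
--             out.extend(input_data[i:j - 1])
--             out.append("\n")
--         else:
--             out.extend(input_data[i:j + 1])
--         i = j + 1
--     input_data[:] = out
--     return input_data
-- ===== Notes on version B (the rewrite author's own statement) =====
-- stated objective: alternative
-- what changed: Replaces the backward index loop with in-place list.pop shifts by a forward jump-scan that locates each candidate "n" with C-level list.index and copies untouched segments in slices (early exit when no "n" occurs at all); intended as faster, measured 1.4x at the largest size (below the 1.5x bar).
import Mathlib
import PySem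

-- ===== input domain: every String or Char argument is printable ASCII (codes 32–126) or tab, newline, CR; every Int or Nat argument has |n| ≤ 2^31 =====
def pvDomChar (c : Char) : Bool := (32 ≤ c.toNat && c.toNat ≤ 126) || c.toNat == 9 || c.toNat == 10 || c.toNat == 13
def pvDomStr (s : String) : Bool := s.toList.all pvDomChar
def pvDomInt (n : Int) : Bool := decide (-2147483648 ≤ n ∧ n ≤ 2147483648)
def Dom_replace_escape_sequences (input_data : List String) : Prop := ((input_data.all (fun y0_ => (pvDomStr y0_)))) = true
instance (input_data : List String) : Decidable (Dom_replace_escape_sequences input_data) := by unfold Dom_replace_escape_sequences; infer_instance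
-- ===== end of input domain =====

-- B replaces A's backward scan with in-place element-shifting pops by a forward jump-scan that
-- finds each candidate "n" with list.index and copies the untouched segments in slices.
-- Both Pythons mutate input_data in place; the equivalence proved here is about the RETURN
-- value (B performs the same final mutation via input_data[:] = out).

-- ===== PORT A =====
-- Python list.pop(k): exact for 0 ≤ k < len, which holds on every executed step (i ≥ 1, i < len)
def pvPopAt (l : List String) (k : Nat) : List String := l.take k ++ l.drop (k + 1)

-- the while loop of A: index i walks down; getD matches Python indexing on the executed
-- (always in-range) indices
def pvLoopA (l : List String) (i : Nat) : List String :=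
  if 0 < i then
    if l.getD i "" = "n" ∧ l.getD (i - 1) "" = "\\" then
      pvLoopA ((pvPopAt l (i - 1)).set (i - 1) "\n") (i - 2)
    else
      pvLoopA l (i - 1)
  else l
termination_by i
decreasing_by all_goals omega

def replace_escape_sequences (input_data : List String) : List String :=
  pvLoopA input_data (input_data.length - 1)

-- ===== PORT B =====
-- the while loop of Source B; j = i + 1 + k is Python's input_data.index("n", i + 1)
-- (index? = none is the ValueError branch); the slices input_data[i:j-1] / input_data[i:j+1]
-- are (l.drop i).take (j-1-i) / (l.drop i).take (j+1-i), exact for these nonnegative bounds;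
-- getD matches input_data[j-1], in range on every executed step (i + 1 ≤ j < len)
def pvLoopB2 (l : List String) (out : List String) (i : Nat) : List String :=
  match h : PySem.List.index? (l.drop (i + 1)) "n" with
  | none => out ++ l.drop i
  | some k =>
    if l.getD (i + 1 + k - 1) "" = "\\" then
      pvLoopB2 l (out ++ (l.drop i).take (i + 1 + k - 1 - i) ++ ["\n"]) (i + 1 + k + 1)
    else
      pvLoopB2 l (out ++ (l.drop i).take (i + 1 + k + 1 - i)) (i + 1 + k + 1)
termination_by l.length - i
decreasing_by
  all_goals
    obtain ⟨hk, -, -⟩ := PySem.List.getElem_of_index?_eq_some h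
    simp only [List.length_drop] at hk
    omega

def replace_escape_sequences_alt (input_data : List String) : List String :=
  if input_data.contains "n" then pvLoopB2 input_data [] 0 else input_data

-- ===== PRECONDITION & SPEC =====
def Spec_replace_escape_sequences (input_data : List String) (out : List String) : Prop := out = replace_escape_sequences_alt input_data
instance (input_data : List String) (out : List String) : Decidable (Spec_replace_escape_sequences input_data out) := by unfold Spec_replace_escape_sequences; infer_instance

-- ===== CLAIM (what is proved, stated in full; the proofs are below) =====
def Claim_equal_replace_escape_sequences : Prop := ∀ (input_data : List String), Dom_replace_escape_sequences input_data → Spec_replace_escape_sequences input_data (replace_escape_sequences input_data)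

-- ===== LEMMAS AND PROOFS =====

-- the common greedy left-to-right specification both loops compute: collapse each
-- ("\\","n") pair (pairs never overlap, since "n" never starts a pair)
def pvLoopB : List String → List String
  | [] => []
  | [x] => [x]
  | a :: b :: rest =>
    if a = "\\" ∧ b = "n" then "\n" :: pvLoopB rest
    else a :: pvLoopB (b :: rest)

-- pvLoopB leaves a cons alone when its first pair is not a match
theorem pvLoopB_cons_nonmatch (a : String) (xs : List String)
    (h : a = "\\" → xs.head? ≠ some "n") :
    pvLoopB (a :: xs) = a :: pvLoopB xs := by
  cases xs with
  | nil => rfl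
  | cons b rest =>
      have : ¬ (a = "\\" ∧ b = "n") := by
        rintro ⟨ha, hb⟩; exact h ha (by simp [hb])
      simp [pvLoopB, this]

-- if pvLoopB fixes a cons, it fixes the tail
theorem pvLoopB_tail (a : String) (xs : List String)
    (h : pvLoopB (a :: xs) = a :: xs) : pvLoopB xs = xs := by
  cases xs with
  | nil => rfl
  | cons b rest =>
      by_cases hm : a = "\\" ∧ b = "n"
      · rw [hm.1] at h
        simp [pvLoopB, hm] at h
      · simpa [pvLoopB, hm] using h

-- a neutral element (neither "n" nor "\\") splits pvLoopB
theorem pvLoopB_split_neutral (a : String) (ha1 : a ≠ "n") (ha2 : a ≠ "\\") :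
    ∀ (xs ys : List String), pvLoopB (xs ++ a :: ys) = pvLoopB xs ++ a :: pvLoopB ys := by
  intro xs
  induction xs using pvLoopB.induct with
  | case1 =>
      intro ys
      simpa [pvLoopB] using pvLoopB_cons_nonmatch a ys (fun h => absurd h ha2)
  | case2 x =>
      intro ys
      have h1 : ¬ (x = "\\" ∧ a = "n") := fun h => ha1 h.2
      simp only [List.cons_append, List.nil_append, pvLoopB, if_neg h1]
      rw [pvLoopB_cons_nonmatch a ys (fun h => absurd h ha2)]
  | case3 p q rest hm ih =>
      intro ys
      simp only [List.cons_append, pvLoopB, if_pos hm, ih ys]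
  | case4 p q rest hm ih =>
      intro ys
      simp only [List.cons_append, pvLoopB, if_neg hm]
      exact congrArg (p :: ·) (ih ys)

-- a "\\","n" pair splits pvLoopB, collapsing to "\n"
theorem pvLoopB_split_pair :
    ∀ (xs ys : List String), pvLoopB (xs ++ "\\" :: "n" :: ys) = pvLoopB xs ++ "\n" :: pvLoopB ys := by
  intro xs
  induction xs using pvLoopB.induct with
  | case1 => intro ys; simp [pvLoopB]
  | case2 x =>
      intro ys
      simp [pvLoopB]
  | case3 p q rest hm ih =>
      intro ys
      simp only [List.cons_append, pvLoopB, if_pos hm, ih ys]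
  | case4 p q rest hm ih =>
      intro ys
      simp only [List.cons_append, pvLoopB, if_neg hm]
      exact congrArg (p :: ·) (ih ys)

-- a list whose tail contains no "n" is a fixed point of pvLoopB
theorem pvLoopB_fix (a : String) (t : List String) (h : ∀ x ∈ t, x ≠ "n") :
    pvLoopB (a :: t) = a :: t := by
  induction t generalizing a with
  | nil => rfl
  | cons b t' ih =>
      have hb : b ≠ "n" := h b (by simp)
      rw [pvLoopB_cons_nonmatch a (b :: t') (fun _ => by simp [hb])]
      rw [ih b (fun x hx => h x (by simp [hx]))]

-- pvLoopB on an element directly followed by "n"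
theorem pvLoopB_seg0 (b : String) (v : List String) :
    pvLoopB (b :: "n" :: v) =
      if b = "\\" then "\n" :: pvLoopB v else b :: "n" :: pvLoopB v := by
  by_cases hb : b = "\\"
  · simp [pvLoopB, hb]
  · rw [if_neg hb, pvLoopB_cons_nonmatch b _ (fun h => absurd h hb),
      pvLoopB_cons_nonmatch "n" v (fun h => absurd h (by decide))]

-- pvLoopB on a head, an "n"-free run u, an element b ≠ "n", then "n": only the (b,"n")
-- pair can match
theorem pvLoopB_segA (u : List String) :
    ∀ (a b : String) (v : List String), (∀ x ∈ u, x ≠ "n") → b ≠ "n" →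
      pvLoopB (a :: (u ++ b :: "n" :: v)) =
        if b = "\\" then a :: (u ++ "\n" :: pvLoopB v)
        else a :: (u ++ b :: "n" :: pvLoopB v) := by
  induction u with
  | nil =>
      intro a b v _ hb
      rw [List.nil_append, pvLoopB_cons_nonmatch a (b :: "n" :: v) (fun _ => by simp [hb]),
        pvLoopB_seg0]
      split_ifs <;> simp
  | cons c u' ih =>
      intro a b v hu hb
      have hc : c ≠ "n" := hu c (by simp)
      rw [List.cons_append, pvLoopB_cons_nonmatch a _ (fun _ => by simp [hc]),
        ih c b v (fun x hx => hu x (by simp [hx])) hb]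
      split_ifs <;> simp

-- the forward jump-scan accumulates exactly pvLoopB of the remaining suffix
theorem pvLoopB2_eq : ∀ (N : Nat) (l : List String) (i : Nat) (out : List String),
    l.length - i < N → pvLoopB2 l out i = out ++ pvLoopB (l.drop i) := by
  intro N
  induction N with
  | zero => intro l i out h; omega
  | succ N ih =>
      intro l i out hN
      rw [pvLoopB2]
      split
      · -- no "n" after position i: the rest is untouched
        next heq =>
          have hn : "n" ∉ l.drop (i + 1) := by
            rwa [← PySem.List.index?_eq_none_iff]
          by_cases hi : i < l.length
          · rw [List.drop_eq_getElem_cons hi,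
              pvLoopB_fix _ _ (fun x hx => by exact fun hxn => hn (hxn ▸ hx))]
          · rw [List.drop_eq_nil_of_le (by omega)]
            rfl
      · next k heq =>
          obtain ⟨pre, suf, hsplit, hlen, hnot⟩ :=
            (PySem.List.index?_eq_some_iff _ _ _).mp heq
          have hlength : l.length - (i + 1) = pre.length + 1 + suf.length := by
            have h := congrArg List.length hsplit
            simp at h
            omega
          have hkl : i + 1 + k < l.length := by omega
          have hi : i < l.length := by omega
          have hdropi : l.drop i = l[i] :: l.drop (i + 1) := by
            rw [List.drop_eq_getElem_cons hi]
          have hsuf : l.drop (i + 1 + k + 1) = suf := by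
            have h1 : l.drop (i + 1 + k + 1) = (l.drop (i + 1)).drop (k + 1) := by
              rw [List.drop_drop]
              congr 1
            rw [h1, hsplit, ← hlen,
              show pre ++ "n" :: suf = (pre ++ ["n"]) ++ suf from by simp,
              show pre.length + 1 = (pre ++ ["n"]).length from by simp,
              List.drop_left]
          have hIH : ∀ out', pvLoopB2 l out' (i + 1 + k + 1)
              = out' ++ pvLoopB (l.drop (i + 1 + k + 1)) := by
            intro out'; exact ih l _ out' (by omega)
          by_cases hpre0 : pre = []
          · -- k = 0: the "n" is directly after position i
            subst hpre0
            have hk0 : k = 0 := by simpa using hlen.symm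
            subst hk0
            have hd : l.drop i = l[i] :: "n" :: suf := by
              rw [hdropi, hsplit]; rfl
            have hgd : l.getD (i + 1 + 0 - 1) "" = l[i] := by
              have h00 : i + 1 + 0 - 1 = i := by omega
              rw [h00, List.getD_eq_getElem l "" hi]
            rw [hgd]
            by_cases hb : l[i] = "\\"
            · rw [if_pos hb, hIH, hsuf, hd, pvLoopB_seg0, if_pos hb]
              simp
            · rw [if_neg hb, hIH, hsuf, hd, pvLoopB_seg0, if_neg hb]
              have ht : List.take (i + 1 + 0 + 1 - i) (l[i] :: "n" :: suf) = [l[i], "n"] := by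
                rw [show i + 1 + 0 + 1 - i = 2 by omega]
                rfl
              rw [ht]
              simp
          · -- k ≥ 1: a nonempty "n"-free run sits between position i and the "n"
            have hlast : pre.dropLast ++ [pre.getLast hpre0] = pre :=
              List.dropLast_append_getLast hpre0
            have hk1 : 1 ≤ k := by
              rw [← hlen]
              exact List.length_pos_of_ne_nil hpre0
            have hdl : ∀ x ∈ pre.dropLast, x ≠ "n" := by
              intro x hx hxn
              exact hnot (hxn ▸ List.mem_of_mem_dropLast hx)
            have hbn : pre.getLast hpre0 ≠ "n" := fun hxn =>
              hnot (hxn ▸ pre.getLast_mem hpre0)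
            have hdll : pre.dropLast.length = k - 1 := by
              rw [List.length_dropLast, hlen]
            have hd : l.drop i
                = l[i] :: (pre.dropLast ++ pre.getLast hpre0 :: "n" :: suf) := by
              rw [hdropi, hsplit]
              conv_lhs => rw [← hlast]
              simp
            -- the element Python tests at j-1 is the last of the run
            have hgd : l.getD (i + 1 + k - 1) "" = pre.getLast hpre0 := by
              rw [List.getD_eq_getElem l "" (by omega), List.getLast_eq_getElem]
              rw [getElem_congr_idx (show i + 1 + k - 1 = (i + 1) + (k - 1) from by omega)]
              rw [← List.getElem_drop (h := by simp [List.length_drop]; omega)]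
              conv_rhs =>
                rw [getElem_congr_idx (show pre.length - 1 = k - 1 from by omega)]
              simp only [hsplit]
              exact List.getElem_append_left (by omega)
            have htk1 : List.take (i + 1 + k - 1 - i)
                (l[i] :: (pre.dropLast ++ pre.getLast hpre0 :: "n" :: suf))
                = l[i] :: pre.dropLast := by
              rw [show i + 1 + k - 1 - i = (k - 1) + 1 by omega, List.take_succ_cons]
              congr 1
              rw [← hdll, List.take_append_of_le_length (le_refl _),
                List.take_of_length_le (le_refl _)]
            have htk2 : List.take (i + 1 + k + 1 - i)
                (l[i] :: (pre.dropLast ++ pre.getLast hpre0 :: "n" :: suf))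
                = l[i] :: (pre.dropLast ++ [pre.getLast hpre0, "n"]) := by
              rw [show i + 1 + k + 1 - i = (k + 1) + 1 by omega, List.take_succ_cons]
              congr 1
              rw [show pre.dropLast ++ pre.getLast hpre0 :: "n" :: suf
                  = (pre.dropLast ++ [pre.getLast hpre0, "n"]) ++ suf by simp]
              have hlen2 : (pre.dropLast ++ [pre.getLast hpre0, "n"]).length = k + 1 := by
                simp [hdll]
                omega
              rw [← hlen2, List.take_append_of_le_length (le_refl _),
                List.take_of_length_le (le_refl _)]
            rw [hgd]
            by_cases hbb : pre.getLast hpre0 = "\\"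
            · rw [if_pos hbb, hIH, hsuf, hd,
                pvLoopB_segA pre.dropLast l[i] _ suf hdl hbn, if_pos hbb, htk1]
              simp
            · rw [if_neg hbb, hIH, hsuf, hd,
                pvLoopB_segA pre.dropLast l[i] _ suf hdl hbn, if_neg hbb, htk2]
              simp

-- port B computes pvLoopB
theorem alt_eq_pvLoopB (l : List String) : replace_escape_sequences_alt l = pvLoopB l := by
  unfold replace_escape_sequences_alt
  by_cases hc : l.contains "n"
  · rw [if_pos hc, pvLoopB2_eq (l.length + 1) l 0 [] (by omega)]
    simp
  · rw [if_neg hc]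
    have hn : "n" ∉ l := by simpa using hc
    cases l with
    | nil => rfl
    | cons a t =>
        exact (pvLoopB_fix a t (fun x hx hxn => hn (hxn ▸ List.mem_cons_of_mem a hx))).symm

-- the invariant for A: while the untouched suffix is a fixed point of pvLoopB, the backward
-- loop computes pvLoopB of the whole list
theorem pvLoopA_eq_pvLoopB : ∀ (i : Nat) (l : List String), i < l.length →
    pvLoopB (l.drop i) = l.drop i → pvLoopA l i = pvLoopB l := by
  intro i
  induction i using Nat.strong_induction_on with
  | _ i IH =>
    intro l hlen hfix
    by_cases hi : 0 < i
    · have hi1 : i - 1 < l.length := by omega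
      have hsucc : i - 1 + 1 = i := by omega
      have hdropi : l.drop (i - 1) = l[i - 1] :: l.drop i := by
        rw [List.drop_eq_getElem_cons hi1, hsucc]
      by_cases hm : l.getD i "" = "n" ∧ l.getD (i - 1) "" = "\\"
      · -- match step
        have hgi : l[i]'hlen = "n" := by
          have := hm.1; rwa [List.getD_eq_getElem l "" hlen] at this
        have hgi1 : l[i - 1]'hi1 = "\\" := by
          have := hm.2; rwa [List.getD_eq_getElem l "" hi1] at this
        have hdrop_i : l.drop i = "n" :: l.drop (i + 1) := by
          rw [List.drop_eq_getElem_cons hlen, hgi]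
        have hdecomp : l = l.take (i - 1) ++ "\\" :: "n" :: l.drop (i + 1) := by
          conv_lhs => rw [← List.take_append_drop (i - 1) l]
          rw [hdropi, hgi1, hdrop_i]
        have htklen : (l.take (i - 1)).length = i - 1 := by
          simp [List.length_take]; omega
        -- the mutated list
        have hmut : (pvPopAt l (i - 1)).set (i - 1) "\n"
            = l.take (i - 1) ++ "\n" :: l.drop (i + 1) := by
          unfold pvPopAt
          rw [hsucc, List.set_append_right _ _ (le_of_eq htklen), htklen, Nat.sub_self,
            hdrop_i]
          rfl
        set l'' := (pvPopAt l (i - 1)).set (i - 1) "\n" with hl''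
        have hlen'' : l''.length = l.length - 1 := by
          rw [hmut]
          simp [htklen]
          omega
        have hfix1 : pvLoopB (l.drop (i + 1)) = l.drop (i + 1) := by
          apply pvLoopB_tail "n"
          rw [← hdrop_i]; exact hfix
        have hfix'' : pvLoopB (l''.drop (i - 2)) = l''.drop (i - 2) := by
          by_cases h1 : i = 1
          · subst h1
            rw [hmut]
            simp only [show (1:Nat) - 1 = 0 from rfl,
              List.take_zero, List.nil_append, List.drop_zero]
            rw [pvLoopB_cons_nonmatch "\n" _ (fun h => absurd h (by decide)), hfix1]
          · have hi2 : 2 ≤ i := by omega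
            have hdrop'' : l''.drop (i - 2) = l[i - 2]'(by omega) :: "\n" :: l.drop (i + 1) := by
              rw [hmut, List.drop_append_of_le_length (by omega)]
              have h21 : (l.take (i - 1)).drop (i - 2) = [l[i - 2]'(by omega)] := by
                rw [List.drop_take, show i - 1 - (i - 2) = 1 from by omega,
                  List.take_one_drop_eq_of_lt_length (show i - 2 < l.length from by omega)]
                rfl
              rw [h21]
              rfl
            rw [hdrop'']
            rw [pvLoopB_cons_nonmatch _ _ (fun _ => by simp),
                pvLoopB_cons_nonmatch "\n" _ (fun h => absurd h (by decide)), hfix1]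
        have hrec : pvLoopA l i = pvLoopA l'' (i - 2) := by
          rw [pvLoopA, if_pos hi, if_pos hm]
        rw [hrec, IH (i - 2) (by omega) l'' (by omega) hfix'']
        rw [hmut, pvLoopB_split_neutral "\n" (by decide) (by decide)]
        conv_rhs => rw [hdecomp, pvLoopB_split_pair]
      · -- no-match step
        have hfix' : pvLoopB (l.drop (i - 1)) = l.drop (i - 1) := by
          rw [hdropi]
          rw [pvLoopB_cons_nonmatch _ _ ?_, hfix]
          intro hb hn
          apply hm
          constructor
          · rw [List.getD_eq_getElem l "" hlen]
            have hh : (l.drop i).head? = some (l[i]'hlen) := by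
              rw [List.drop_eq_getElem_cons hlen]; rfl
            rw [hh] at hn
            exact Option.some.inj hn
          · rw [List.getD_eq_getElem l "" hi1, hb]
        have hrec : pvLoopA l i = pvLoopA l (i - 1) := by
          rw [pvLoopA, if_pos hi, if_neg hm]
        rw [hrec, IH (i - 1) (by omega) l (by omega) hfix']
    · have h0 : i = 0 := by omega
      subst h0
      rw [pvLoopA]
      simp only [lt_irrefl, if_false]
      simpa using hfix.symm

-- ===== VERDICT (by name: the statement is the Claim_ definition above) =====
theorem replace_escape_sequences_spec : Claim_equal_replace_escape_sequences := by
  intro l _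
  unfold Spec_replace_escape_sequences replace_escape_sequences
  rw [alt_eq_pvLoopB]
  cases l with
  | nil => rw [pvLoopA]; simp [pvLoopB]
  | cons a t =>
      apply pvLoopA_eq_pvLoopB
      · simp
      · have hlen : ((a :: t).drop ((a :: t).length - 1)).length = 1 := by
          simp
        match hd : (a :: t).drop ((a :: t).length - 1), hlen with
        | [x], _ => rfl
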